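-- pv_equiv track=rewrite | github.com/RRM006/cse226 | backend/core/shared.py | detect_program
-- ===== SOURCE A (Python) =====
-- def detect_program(records):
--     """Heuristically detect the program from course codes."""
--     codes = [r['code'] for r in records]
--     has_llb = any(c.startswith('LLB') for c in codes)
--     has_eee_major = any(c.startswith('EEE2') or c.startswith('EEE3') or c.startswith('EEE4') for c in codes)
--     has_cse_major = any(c.startswith('CSE2') or c.startswith('CSE3') or c.startswith('CSE4') for c in codes)
--
--     if has_llb:
--         return 'LLB'
--     elif has_eee_major and not has_cse_major:
--         return 'BSEEE'
--     else:
--         return 'BSCSE'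
-- ===== SOURCE B (Python) =====
-- _RESULT = ('LLB', 'BSCSE', 'BSEEE', 'BSCSE')
--
-- def _rank(code):
--     """Priority of a course code: lower rank = more decisive for the program."""
--     if code.startswith('LLB'):
--         return 0
--     head = code[:4]
--     if head in ('CSE2', 'CSE3', 'CSE4'):
--         return 1
--     if head in ('EEE2', 'EEE3', 'EEE4'):
--         return 2
--     return 3
--
-- def detect_program(records):
--     """Heuristically detect the program from course codes."""
--     best = min((_rank(r['code']) for r in records), default=3)
--     return _RESULT[best]
-- ===== Notes on version B (the rewrite author's own statement) =====
-- stated objective: alternative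
-- what changed: Replaces A's three boolean any() scans plus an if/elif chain with a priority ranking: each code is mapped to a rank (LLB=0, CSE-major=1, EEE-major=2, other=3), the minimum rank is taken, and the program is read from a lookup table.
import Mathlib
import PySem

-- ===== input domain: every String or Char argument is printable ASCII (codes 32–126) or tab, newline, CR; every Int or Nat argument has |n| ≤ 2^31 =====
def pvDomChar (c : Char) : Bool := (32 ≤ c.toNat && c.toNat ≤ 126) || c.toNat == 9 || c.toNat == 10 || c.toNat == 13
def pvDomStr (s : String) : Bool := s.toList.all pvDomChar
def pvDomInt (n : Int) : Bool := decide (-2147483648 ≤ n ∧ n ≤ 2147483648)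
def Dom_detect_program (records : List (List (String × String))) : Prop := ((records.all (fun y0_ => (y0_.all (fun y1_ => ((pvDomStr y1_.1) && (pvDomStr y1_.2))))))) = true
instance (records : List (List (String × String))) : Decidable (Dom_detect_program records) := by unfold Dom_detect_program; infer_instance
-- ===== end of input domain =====

-- B ranks each code by priority (LLB=0, CSE-major=1, EEE-major=2, other=3), takes the minimum
-- rank and reads the program from a table, instead of A's three any() flags and if/elif chain.

-- r['code'] on an assoc-list dict: first matching key (unique keys in a real dict); none = KeyError, excluded by Pre_.
def pvCode (r : List (String × String)) : String :=
  ((r.find? (fun p => p.1 == "code")).map Prod.snd).getD ""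

-- ===== PORT A =====
def detect_program (records : List (List (String × String))) : String :=
  let codes := records.map pvCode
  let has_llb := codes.any (fun c => PySem.Str.startswith c "LLB")
  let has_eee_major := codes.any (fun c => PySem.Str.startswith c "EEE2" || PySem.Str.startswith c "EEE3" || PySem.Str.startswith c "EEE4")
  let has_cse_major := codes.any (fun c => PySem.Str.startswith c "CSE2" || PySem.Str.startswith c "CSE3" || PySem.Str.startswith c "CSE4")
  if has_llb then "LLB"
  else if has_eee_major && !has_cse_major then "BSEEE"
  else "BSCSE"

-- ===== PORT B =====
-- _rank from Source B: code[:4] is Str.slice, the tuple memberships are the == disjunctions.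
def pvRank (code : String) : Nat :=
  if PySem.Str.startswith code "LLB" then 0
  else
    let head := PySem.Str.slice code none (some 4)
    if head == "CSE2" || head == "CSE3" || head == "CSE4" then 1
    else if head == "EEE2" || head == "EEE3" || head == "EEE4" then 2
    else 3

-- min(gen, default=3) is min?·getD 3; _RESULT[best] always has best ≤ 3, so getD's default is never used.
def detect_program_alt (records : List (List (String × String))) : String :=
  let best := (PySem.List.min? (records.map (fun r => pvRank (pvCode r))) (fun x => x)).getD 3
  ["LLB", "BSCSE", "BSEEE", "BSCSE"].getD best ""

-- ===== PRECONDITION & SPEC =====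
-- Pre_ excludes records lacking a 'code' key, on which A raises KeyError.
def Pre_detect_program (records : List (List (String × String))) : Prop :=
  (records.all (fun r => r.any (fun p => p.1 == "code"))) = true
instance (records : List (List (String × String))) : Decidable (Pre_detect_program records) := by unfold Pre_detect_program; infer_instance
def pvWitness_detect_program : (List (List (String × String))) := [[("code", "CSE225")], [("code", "LLB101")]]

def Spec_detect_program (records : List (List (String × String))) (out : String) : Prop := out = detect_program_alt records
instance (records : List (List (String × String))) (out : String) : Decidable (Spec_detect_program records out) := by unfold Spec_detect_program; infer_instance

-- ===== CLAIM (what is proved, stated in full; the proofs are below) =====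
def Claim_equal_detect_program : Prop := ∀ (records : List (List (String × String))), Dom_detect_program records → Pre_detect_program records → Spec_detect_program records (detect_program records)

-- ===== LEMMAS AND PROOFS =====
-- abbreviations for A's three predicates (proof-side only)
def pvL (c : String) : Bool := PySem.Str.startswith c "LLB"
def pvC (c : String) : Bool := PySem.Str.startswith c "CSE2" || PySem.Str.startswith c "CSE3" || PySem.Str.startswith c "CSE4"
def pvE (c : String) : Bool := PySem.Str.startswith c "EEE2" || PySem.Str.startswith c "EEE3" || PySem.Str.startswith c "EEE4"

-- code[:4] is the first four characters
lemma pvHead_toList (c : String) :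
    (PySem.Str.slice c none (some 4)).toList = c.toList.take 4 := by
  simp [pysem]

-- head == p (with |p| = 4) is exactly startswith p
lemma pvHead_eq (c p : String) (hp : p.toList.length = 4) :
    (PySem.Str.slice c none (some 4) == p) = PySem.Str.startswith c p := by
  have hiff : ((PySem.Str.slice c none (some 4) == p) = true) ↔ PySem.Str.startswith c p = true := by
    rw [beq_iff_eq, PySem.Str.startswith_eq, PySem.Chars.startswith_iff]
    constructor
    · intro h
      have hl : p.toList = c.toList.take 4 := by rw [← h, pvHead_toList]
      rw [hl]; exact List.take_prefix 4 c.toList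
    · intro h
      have hl : p.toList = c.toList.take p.toList.length := List.prefix_iff_eq_take.mp h
      have hteq : (PySem.Str.slice c none (some 4)).toList = p.toList := by
        rw [pvHead_toList, hl, hp]
      exact String.toList_inj.mp hteq
  cases hbeq : (PySem.Str.slice c none (some 4) == p) <;>
    cases hb : PySem.Str.startswith c p <;> simp_all

-- B's rank, characterized by A's predicates
lemma pvRank_eq (c : String) :
    pvRank c = if pvL c then 0 else if pvC c then 1 else if pvE c then 2 else 3 := by
  unfold pvRank pvL pvC pvE
  simp only [pvHead_eq c "CSE2" (by decide), pvHead_eq c "CSE3" (by decide),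
    pvHead_eq c "CSE4" (by decide), pvHead_eq c "EEE2" (by decide),
    pvHead_eq c "EEE3" (by decide), pvHead_eq c "EEE4" (by decide)]

lemma pvRank_le (c : String) : pvRank c ≤ 3 := by
  rw [pvRank_eq]; split_ifs <;> omega

lemma pvFoldl_min_init (t : List Nat) (x a : Nat) :
    t.foldl min (min x a) = min x (t.foldl min a) := by
  induction t generalizing a with
  | nil => rfl
  | cons b t ih =>
      simp only [List.foldl_cons]
      rw [min_assoc]
      exact ih (min a b)

-- min of two rank if-chains is the if-chain of the ORed flags
lemma pvMin_chain (a1 a2 a3 b1 b2 b3 : Bool) :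
    min (if a1 then 0 else if a2 then 1 else if a3 then 2 else 3)
        (if b1 then 0 else if b2 then 1 else if b3 then 2 else 3) =
      (if (a1 || b1) then 0 else if (a2 || b2) then 1 else if (a3 || b3) then (2:Nat) else 3) := by
  revert a1 a2 a3 b1 b2 b3; decide

lemma pvFoldl_rank (codes : List String) :
    (codes.map pvRank).foldl min 3 =
      (if codes.any pvL then 0 else if codes.any pvC then 1 else if codes.any pvE then 2 else 3) := by
  induction codes with
  | nil => rfl
  | cons c cs ih =>
      calc ((c :: cs).map pvRank).foldl min 3
          = (cs.map pvRank).foldl min (min (pvRank c) 3) := by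
            simp only [List.map_cons, List.foldl_cons, min_eq_right (pvRank_le c),
              min_eq_left (pvRank_le c)]
        _ = min (pvRank c) ((cs.map pvRank).foldl min 3) := pvFoldl_min_init _ _ _
        _ = _ := by
            rw [ih, pvRank_eq]
            simp only [List.any_cons]
            exact pvMin_chain _ _ _ _ _ _

-- minimum rank over the codes, as the if-chain on A's any-flags
lemma pvMin_rank (codes : List String) :
    (PySem.List.min? (codes.map pvRank) (fun x => x)).getD 3 =
      (if codes.any pvL then 0 else if codes.any pvC then 1 else if codes.any pvE then 2 else 3) := by
  rw [← pvFoldl_rank]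
  cases codes with
  | nil => rfl
  | cons c cs =>
      rw [List.map_cons, PySem.List.min?_id_cons, Option.getD_some, List.foldl_cons,
        min_eq_right (pvRank_le c)]

-- ===== VERDICT (by name: the statement is the Claim_ definition above) =====
theorem detect_program_spec : Claim_equal_detect_program := by
  intro records _ _
  unfold Spec_detect_program detect_program detect_program_alt
  have hmap : records.map (fun r => pvRank (pvCode r)) = (records.map pvCode).map pvRank := by
    rw [List.map_map]; rfl
  rw [hmap, pvMin_rank]
  have e1 : (fun c => PySem.Str.startswith c "LLB") = pvL := rfl
  have e2 : (fun c => PySem.Str.startswith c "CSE2" || PySem.Str.startswith c "CSE3" || PySem.Str.startswith c "CSE4") = pvC := rfl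
  have e3 : (fun c => PySem.Str.startswith c "EEE2" || PySem.Str.startswith c "EEE3" || PySem.Str.startswith c "EEE4") = pvE := rfl
  rw [e1, e2, e3]
  cases hL : (records.map pvCode).any pvL <;> cases hC : (records.map pvCode).any pvC <;>
    cases hE : (records.map pvCode).any pvE <;> simp only [hL, hC, hE] <;> rfl
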